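-- pv_equiv track=rewrite | github.com/Scalas/Kakao | i05.py | solution
-- ===== SOURCE A (Python) =====
-- def solution(stones, k):
--     answer = 0
--     l = 0
--     r = max(stones)
--     while(l <= r):
--         m = (l+r)//2
--         if(check(stones, m, k)):
--             answer = m
--             l = m+1
--         else:
--             r = m-1
--
--     return answer
--
-- def check(stones, m, k):
--     count = 0
--     for stone in stones:
--         if(stone < m):
--             count += 1
--         else:
--             count = 0
--         if(count==k):
--             return False
--     return True
-- ===== SOURCE B (Python) =====
-- def solution(stones, k):
--     n = len(stones)
--     if k > n:
--         best = max(stones)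
--     else:
--         best = min(max(stones[i:i + k]) for i in range(n - k + 1))
--     return best if best > 0 else 0
-- ===== Notes on version B (the rewrite author's own statement) =====
-- stated objective: simpler
-- what changed: replaces the binary search over jump heights plus a run-length feasibility check with a direct computation: the answer is the minimum over all k-windows of the window maximum, clamped below at 0
-- outside the precondition, e.g. on solution([3, 1], 0): A returns 0, B raises ValueError; on solution([3, 1], -2): A returns 3, B raises ValueError
import Mathlib
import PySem

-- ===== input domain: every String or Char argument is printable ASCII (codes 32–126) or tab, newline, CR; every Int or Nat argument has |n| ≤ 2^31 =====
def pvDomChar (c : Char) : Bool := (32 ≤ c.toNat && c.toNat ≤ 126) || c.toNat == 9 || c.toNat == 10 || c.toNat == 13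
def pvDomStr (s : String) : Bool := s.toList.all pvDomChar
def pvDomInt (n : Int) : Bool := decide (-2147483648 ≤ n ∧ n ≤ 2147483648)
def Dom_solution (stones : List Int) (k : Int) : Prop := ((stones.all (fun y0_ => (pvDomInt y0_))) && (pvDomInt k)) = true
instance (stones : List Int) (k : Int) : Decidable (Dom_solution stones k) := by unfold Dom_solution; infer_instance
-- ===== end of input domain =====

-- B replaces A's binary search + run-length check by the 0-clamped minimum over all k-windows
-- of the window maximum (objective: simpler).


-- ===== PORT A =====
-- check(stones, m, k): count of the current run of stones < m; False as soon as count == k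
def checkAux (m k : Int) : List Int → Int → Bool
  | [], _ => true
  | s :: rest, count =>
      let count := if s < m then count + 1 else 0
      if count = k then false else checkAux m k rest count

def check (stones : List Int) (m k : Int) : Bool := checkAux m k stones 0

-- the while(l <= r) binary-search loop of A
def bsearchAux (stones : List Int) (k l r answer : Int) : Int :=
  if h : l ≤ r then
    let m := PySem.Int.floordiv (l + r) 2
    if check stones m k then bsearchAux stones k (m + 1) r m
    else bsearchAux stones k l (m - 1) answer
  else answer
termination_by (r + 1 - l).toNat
decreasing_by
  · have hb := PySem.Int.floordiv_two_mid_bounds h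
    omega
  · have hb := PySem.Int.floordiv_two_mid_bounds h
    omega

def solution (stones : List Int) (k : Int) : Int :=
  bsearchAux stones k 0 ((PySem.List.max? stones (fun y => y)).getD 0) 0

-- ===== PORT B =====
def solution_alt (stones : List Int) (k : Int) : Int :=
  let n : Int := stones.length
  let best : Int :=
    if k > n then (PySem.List.max? stones (fun y => y)).getD 0
    else (PySem.List.min?
            ((PySem.List.pyRange 0 (n - k + 1) 1).map
              (fun i => (PySem.List.max? (PySem.List.slice stones (some i) (some (i + k))) (fun y => y)).getD 0))
            (fun y => y)).getD 0
  if best > 0 then best else 0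

-- ===== PRECONDITION & SPEC =====
-- Pre_ excludes empty stones, on which A's max([]) raises ValueError, and k ≤ 0, which is outside
-- the natural domain (k is the number of consecutive skippable stones, ≥ 1 per the problem);
-- on k ≤ 0 B's max over an empty window raises ValueError while A returns a degenerate value.
def Pre_solution (stones : List Int) (k : Int) : Prop := stones ≠ [] ∧ 1 ≤ k
instance (stones : List Int) (k : Int) : Decidable (Pre_solution stones k) := by
  unfold Pre_solution; infer_instance

def pvWitness_solution : List Int × Int := ([2, 4, 5, 3, 2, 1, 4, 2, 5, 1], 3)

def Spec_solution (stones : List Int) (k : Int) (out : Int) : Prop := out = solution_alt stones k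
instance (stones : List Int) (k : Int) (out : Int) : Decidable (Spec_solution stones k out) := by
  unfold Spec_solution; infer_instance

-- ===== CLAIM (what is proved, stated in full; the proofs are below) =====
def Claim_equal_solution : Prop := ∀ (stones : List Int) (k : Int), Dom_solution stones k → Pre_solution stones k → Spec_solution stones k (solution stones k)

-- ===== LEMMAS AND PROOFS =====

-- run-length check: true when the list is too short to ever reach count k
theorem check_true_of_short (m k : Int) :
    ∀ (xs : List Int) (c : Int), 1 ≤ k → 0 ≤ c → c + (xs.length : Int) < k →
      checkAux m k xs c = true := by
  intro xs
  induction xs with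
  | nil => intro c _ _ _; rfl
  | cons s rest ih =>
      intro c hk hc hlen
      simp only [List.length_cons] at hlen
      unfold checkAux
      by_cases hs : s < m
      · rw [if_pos hs, if_neg (by push_cast at hlen; omega)]
        exact ih (c + 1) hk (by omega) (by push_cast at hlen; omega)
      · rw [if_neg hs, if_neg (by omega)]
        exact ih 0 hk le_rfl (by push_cast at hlen; omega)

theorem checkAux_false_iff (m k : Int) (hk : 1 ≤ k) :
    ∀ (xs : List Int) (c : Int), 0 ≤ c → c < k →
      (checkAux m k xs c = false ↔
        (∃ w suf, xs = w ++ suf ∧ (w.length : Int) = k - c ∧ ∀ x ∈ w, x < m) ∨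
        (∃ pre w suf, xs = pre ++ w ++ suf ∧ (w.length : Int) = k ∧ ∀ x ∈ w, x < m)) := by
  intro xs
  induction xs with
  | nil =>
      intro c hc0 hck
      constructor
      · intro h; exact absurd h (by simp [checkAux])
      · rintro (⟨w, suf, hsplit, hlen, _⟩ | ⟨pre, w, suf, hsplit, hlen, _⟩)
        · have hw : w = [] := (List.append_eq_nil_iff.mp hsplit.symm).1
          subst hw; simp at hlen; omega
        · have hw : w = [] := by
            rcases List.append_eq_nil_iff.mp hsplit.symm with ⟨h1, _⟩
            exact (List.append_eq_nil_iff.mp h1).2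
          subst hw; simp at hlen; omega
  | cons s rest ih =>
      intro c hc0 hck
      unfold checkAux
      by_cases hs : s < m
      · rw [if_pos hs]
        by_cases hck' : c + 1 = k
        · rw [if_pos hck']
          constructor
          · intro _
            refine Or.inl ⟨[s], rest, rfl, by simp; omega, ?_⟩
            intro x hx
            have hx' : x = s := by simpa using hx
            subst hx'; exact hs
          · intro _; rfl
        · rw [if_neg hck']
          rw [ih (c + 1) (by omega) (by omega)]
          constructor
          · rintro (⟨w, suf, hsplit, hlen, hsmall⟩ | ⟨pre, w, suf, hsplit, hlen, hsmall⟩)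
            · refine Or.inl ⟨s :: w, suf, by rw [hsplit]; rfl, by simp; omega, ?_⟩
              intro x hx
              rcases List.mem_cons.mp hx with h | h
              · subst h; exact hs
              · exact hsmall x h
            · exact Or.inr ⟨s :: pre, w, suf, by rw [hsplit]; rfl, hlen, hsmall⟩
          · rintro (⟨w, suf, hsplit, hlen, hsmall⟩ | ⟨pre, w, suf, hsplit, hlen, hsmall⟩)
            · cases w with
              | nil => simp at hlen; omega
              | cons a t =>
                  obtain ⟨rfl, hrest⟩ : s = a ∧ rest = t ++ suf := by simpa using hsplit
                  refine Or.inl ⟨t, suf, hrest, ?_, fun x hx => hsmall x (List.mem_cons_of_mem _ hx)⟩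
                  simp only [List.length_cons] at hlen
                  push_cast at hlen ⊢
                  omega
            · cases pre with
              | nil =>
                  simp only [List.nil_append] at hsplit
                  cases w with
                  | nil => simp at hlen; omega
                  | cons a t =>
                      obtain ⟨rfl, hrest⟩ : s = a ∧ rest = t ++ suf := by simpa using hsplit
                      refine Or.inl ⟨t.take (k - c - 1).toNat, t.drop (k - c - 1).toNat ++ suf,
                        by rw [hrest, ← List.append_assoc, List.take_append_drop], ?_, ?_⟩
                      · rw [List.length_take]
                        simp only [List.length_cons] at hlen
                        push_cast at hlen ⊢
                        omega
                      · intro x hx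
                        exact hsmall x (List.mem_cons_of_mem _ (List.mem_of_mem_take hx))
              | cons p pre0 =>
                  obtain ⟨-, hrest⟩ : s = p ∧ rest = pre0 ++ (w ++ suf) := by simpa using hsplit
                  exact Or.inr ⟨pre0, w, suf, by rw [hrest, List.append_assoc], hlen, hsmall⟩
      · rw [if_neg hs, if_neg (by omega)]
        rw [ih 0 le_rfl (by omega)]
        constructor
        · rintro (⟨w, suf, hsplit, hlen, hsmall⟩ | ⟨pre, w, suf, hsplit, hlen, hsmall⟩)
          · exact Or.inr ⟨[s], w, suf, by rw [hsplit]; rfl, by rw [hlen]; ring, hsmall⟩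
          · exact Or.inr ⟨s :: pre, w, suf, by rw [hsplit]; rfl, hlen, hsmall⟩
        · rintro (⟨w, suf, hsplit, hlen, hsmall⟩ | ⟨pre, w, suf, hsplit, hlen, hsmall⟩)
          · cases w with
            | nil => simp at hlen; omega
            | cons a t =>
                obtain ⟨rfl, -⟩ : s = a ∧ rest = t ++ suf := by simpa using hsplit
                exact absurd (hsmall s (List.mem_cons_self ..)) hs
          · cases pre with
            | nil =>
                simp only [List.nil_append] at hsplit
                cases w with
                | nil => simp at hlen; omega
                | cons a t =>
                    obtain ⟨rfl, -⟩ : s = a ∧ rest = t ++ suf := by simpa using hsplit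
                    exact absurd (hsmall s (List.mem_cons_self ..)) hs
            | cons p pre0 =>
                obtain ⟨-, hrest⟩ : s = p ∧ rest = pre0 ++ (w ++ suf) := by simpa using hsplit
                exact Or.inr ⟨pre0, w, suf, by rw [hrest, List.append_assoc], hlen, hsmall⟩

-- check = false ↔ some k consecutive stones are all < m
theorem check_false_iff (stones : List Int) (m k : Int) (hk : 1 ≤ k) :
    check stones m k = false ↔
      ∃ pre w suf, stones = pre ++ w ++ suf ∧ (w.length : Int) = k ∧ ∀ x ∈ w, x < m := by
  unfold check
  rw [checkAux_false_iff m k hk stones 0 le_rfl (by omega)]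
  constructor
  · rintro (⟨w, suf, hsplit, hlen, hsmall⟩ | h)
    · exact ⟨[], w, suf, by rw [hsplit]; rfl, by rw [hlen]; ring, hsmall⟩
    · exact h
  · exact Or.inr


-- the binary-search loop returns v once v is characterised as the check threshold
theorem bsearchAux_eq (stones : List Int) (k v R : Int)
    (h1 : ∀ m, 0 ≤ m → m ≤ R → check stones m k = true → m ≤ v)
    (h2 : ∀ m, 1 ≤ m → m ≤ v → check stones m k = true)
    (h3 : check stones 0 k = false → v = 0) :
    ∀ (fuel : Nat) (l r ans : Int), (r + 1 - l).toNat ≤ fuel → 0 ≤ l →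
      (r ≤ R ∨ r < l) → (l = 0 → ans = 0) → (v ≤ r ∨ r < l) →
      ((l ≤ v ∧ v ≤ r) ∨ ans = v) →
      bsearchAux stones k l r ans = v := by
  intro fuel
  induction fuel with
  | zero =>
      intro l r ans hf hl hrR hans hvr hinv
      have hlr : ¬ l ≤ r := by omega
      rw [bsearchAux, dif_neg hlr]
      rcases hinv with ⟨ha, hb⟩ | h
      · exact absurd (le_trans ha hb) hlr
      · exact h
  | succ fuel ih =>
      intro l r ans hf hl hrR hans hvr hinv
      by_cases hlr : l ≤ r
      · have hmb := PySem.Int.floordiv_two_mid_bounds hlr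
        rw [bsearchAux, dif_pos hlr]
        set m := PySem.Int.floordiv (l + r) 2 with hm
        have hrR' : r ≤ R := by
          rcases hrR with h | h
          exacts [h, absurd hlr (by omega)]
        by_cases hc : check stones m k = true
        · rw [if_pos hc]
          have hmv : m ≤ v := h1 m (by omega) (by omega) hc
          refine ih (m + 1) r m (by omega) (by omega) (Or.inl hrR') (by omega) ?_ ?_
          · rcases hvr with h | h
            · exact Or.inl h
            · exact absurd hlr (by omega)
          · have hvr' : v ≤ r := by
              rcases hvr with h | h
              exacts [h, absurd hlr (by omega)]
            by_cases hv : m + 1 ≤ v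
            · exact Or.inl ⟨hv, hvr'⟩
            · right; omega
        · rw [if_neg hc]
          have hcf : check stones m k = false := by
            cases h : check stones m k
            · rfl
            · exact absurd h hc
          by_cases hm1 : 1 ≤ m
          · have hvm : v < m := by
              by_contra hcon
              have hmle : m ≤ v := by omega
              rw [h2 m hm1 hmle] at hcf
              exact absurd hcf (by simp)
            refine ih l (m - 1) ans (by omega) hl (Or.inl (by omega)) hans (Or.inl (by omega)) ?_
            rcases hinv with ⟨ha, hb⟩ | h
            · exact Or.inl ⟨ha, by omega⟩
            · exact Or.inr h
          · have hm0 : m = 0 := by omega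
            have hl0 : l = 0 := by omega
            have hv00 : v = 0 := h3 (hm0 ▸ hcf)
            refine ih l (m - 1) ans (by omega) hl (Or.inr (by omega)) hans (Or.inr (by omega)) ?_
            right
            rw [hans hl0, hv00]
      · rw [bsearchAux, dif_neg hlr]
        rcases hinv with ⟨ha, hb⟩ | h
        · exact absurd (le_trans ha hb) hlr
        · exact h

theorem solution_eq (stones : List Int) (k v : Int)
    (hv0 : 0 ≤ v)
    (h1 : ∀ m, 0 ≤ m → m ≤ (PySem.List.max? stones (fun y => y)).getD 0 →
            check stones m k = true → m ≤ v)
    (h2 : ∀ m, 1 ≤ m → m ≤ v → check stones m k = true)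
    (h3 : check stones 0 k = false → v = 0)
    (h4 : v ≤ (PySem.List.max? stones (fun y => y)).getD 0 ∨ v = 0) :
    solution stones k = v := by
  unfold solution
  set R := (PySem.List.max? stones (fun y => y)).getD 0 with hR
  refine bsearchAux_eq stones k v R h1 h2 h3 (R + 1).toNat 0 R 0 (by omega) le_rfl
    ?_ (fun _ => rfl) ?_ ?_
  · by_cases h : 0 ≤ R
    · exact Or.inl le_rfl
    · exact Or.inr (by omega)
  · rcases h4 with h | h
    · exact Or.inl h
    · by_cases hRn : 0 ≤ R
      · exact Or.inl (by omega)
      · exact Or.inr (by omega)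
  · rcases h4 with h | h
    · exact Or.inl ⟨hv0, h⟩
    · exact Or.inr h.symm

-- a list splits as prefix, window of length K at j, and tail
theorem take_window_drop {α : Type} (xs : List α) (j K : Nat) :
    xs = xs.take j ++ (xs.drop j).take K ++ xs.drop (j + K) := by
  rw [List.append_assoc]
  conv_lhs => rw [← List.take_append_drop j xs]
  congr 1
  conv_lhs => rw [← List.take_append_drop K (xs.drop j)]
  congr 1
  rw [List.drop_drop, Nat.add_comm]

-- the k-window of stones starting at index i, with its Python max
theorem window_max_spec (stones : List Int) (k i : Int) (hk : 1 ≤ k) (hi : 0 ≤ i)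
    (hik : i + k ≤ (stones.length : Int)) :
    ∃ w : List Int,
      w = (stones.drop i.toNat).take k.toNat ∧
      stones = stones.take i.toNat ++ w ++ stones.drop (i.toNat + k.toNat) ∧
      (w.length : Int) = k ∧
      (PySem.List.max? (PySem.List.slice stones (some i) (some (i + k))) (fun y => y)).getD 0 ∈ w ∧
      ∀ y ∈ w, y ≤ (PySem.List.max? (PySem.List.slice stones (some i) (some (i + k))) (fun y => y)).getD 0 := by
  have hslice : PySem.List.slice stones (some i) (some (i + k)) = (stones.drop i.toNat).take k.toNat := by
    rw [PySem.List.slice_toNat stones hi (by omega)]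
    congr 1
    omega
  have hwlen : ((stones.drop i.toNat).take k.toNat).length = k.toNat := by
    rw [List.length_take, List.length_drop]; omega
  have hwne : (stones.drop i.toNat).take k.toNat ≠ [] := by
    intro h; rw [h] at hwlen; simp at hwlen; omega
  obtain ⟨M, hM⟩ : ∃ M, PySem.List.max? ((stones.drop i.toNat).take k.toNat) (fun y => y) = some M := by
    cases h : PySem.List.max? ((stones.drop i.toNat).take k.toNat) (fun y => y) with
    | none =>
        rw [PySem.List.max?_eq_none_iff] at h
        exact absurd h hwne
    | some M => exact ⟨M, rfl⟩
  have hgetD : (PySem.List.max? (PySem.List.slice stones (some i) (some (i + k))) (fun y => y)).getD 0 = M := by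
    rw [hslice, hM]; rfl
  refine ⟨(stones.drop i.toNat).take k.toNat, rfl, take_window_drop stones i.toNat k.toNat,
    by rw [hwlen]; omega, by rw [hgetD]; exact PySem.List.max?_mem hM, ?_⟩
  intro y hy
  rw [hgetD]
  exact PySem.List.max?_isMax hM y hy

-- a decomposition pre ++ w ++ suf names the window at index pre.length
theorem decomp_window {α : Type} (stones pre w suf : List α) (h : stones = pre ++ w ++ suf) :
    (stones.drop pre.length).take w.length = w ∧ pre.length + w.length ≤ stones.length := by
  subst h
  constructor
  · rw [List.append_assoc, List.drop_left, List.take_left]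
  · simp [List.length_append]

-- A's check is true for every m once the list is shorter than k
theorem check_true_of_short' (stones : List Int) (m k : Int) (hk : 1 ≤ k)
    (h : (stones.length : Int) < k) : check stones m k = true := by
  unfold check
  exact check_true_of_short m k stones 0 hk le_rfl (by omega)

-- ===== VERDICT (by name: the statement is the Claim_ definition above) =====
theorem solution_spec : Claim_equal_solution := by
  intro stones k _ hpre
  obtain ⟨hne, hk⟩ := hpre
  unfold Spec_solution
  obtain ⟨Rv, hR⟩ : ∃ Rv, PySem.List.max? stones (fun y => y) = some Rv := by
    cases h : PySem.List.max? stones (fun y => y) with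
    | none => rw [PySem.List.max?_eq_none_iff] at h; exact absurd h hne
    | some Rv => exact ⟨Rv, rfl⟩
  have hRd : (PySem.List.max? stones (fun y => y)).getD 0 = Rv := by rw [hR]; rfl
  have hRmax : ∀ y ∈ stones, y ≤ Rv := fun y hy => PySem.List.max?_isMax hR y hy
  by_cases hkn : k > (stones.length : Int)
  · -- k exceeds the number of stones: no window, check is always true
    have halt : solution_alt stones k = if Rv > 0 then Rv else 0 := by
      simp only [solution_alt]
      rw [if_pos hkn, hRd]
    rw [halt]
    refine solution_eq stones k _ (by split_ifs <;> omega) ?_ ?_ ?_ ?_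
    · intro m hm0 hmR _
      rw [hRd] at hmR
      split_ifs <;> omega
    · intro m _ _
      exact check_true_of_short' stones m k hk (by omega)
    · intro hc
      rw [check_true_of_short' stones 0 k hk (by omega)] at hc
      exact absurd hc (by simp)
    · rw [hRd]
      split_ifs with h
      · exact Or.inl le_rfl
      · exact Or.inr rfl
  · -- at least one window of k stones exists
    have hlen1 : 0 < stones.length := List.length_pos_of_ne_nil hne
    obtain ⟨T, hT⟩ : ∃ T, PySem.List.min?
        ((PySem.List.pyRange 0 ((stones.length : Int) - k + 1) 1).map
          (fun i => (PySem.List.max? (PySem.List.slice stones (some i) (some (i + k))) (fun y => y)).getD 0))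
        (fun y => y) = some T := by
      cases h : PySem.List.min?
          ((PySem.List.pyRange 0 ((stones.length : Int) - k + 1) 1).map
            (fun i => (PySem.List.max? (PySem.List.slice stones (some i) (some (i + k))) (fun y => y)).getD 0))
          (fun y => y) with
      | none =>
          rw [PySem.List.min?_eq_none_iff] at h
          rw [PySem.List.pyRange_one_cons (by omega)] at h
          simp at h
      | some T => exact ⟨T, rfl⟩
    have hTmem := PySem.List.min?_mem hT
    have hTmin : ∀ y ∈ (PySem.List.pyRange 0 ((stones.length : Int) - k + 1) 1).map
        (fun i => (PySem.List.max? (PySem.List.slice stones (some i) (some (i + k))) (fun y => y)).getD 0),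
        T ≤ y := fun y hy => PySem.List.min?_isMin hT y hy
    -- every stone index i with a full window: its window max is in the mapped list
    have hFin : ∀ i : Int, 0 ≤ i → i + k ≤ (stones.length : Int) →
        (PySem.List.max? (PySem.List.slice stones (some i) (some (i + k))) (fun y => y)).getD 0
          ∈ (PySem.List.pyRange 0 ((stones.length : Int) - k + 1) 1).map
            (fun i => (PySem.List.max? (PySem.List.slice stones (some i) (some (i + k))) (fun y => y)).getD 0) := by
      intro i hi0 hik
      exact List.mem_map.mpr ⟨i, PySem.List.mem_pyRange_one.mpr ⟨hi0, by omega⟩, rfl⟩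
    -- the witness window achieving T
    obtain ⟨i0, hi0R, hFi0⟩ := List.mem_map.mp hTmem
    obtain ⟨hi00, hi01⟩ := PySem.List.mem_pyRange_one.mp hi0R
    obtain ⟨w0, hw0eq, hdec0, hwlen0, hmem0, hbound0⟩ :=
      window_max_spec stones k i0 hk hi00 (by omega)
    rw [hFi0] at hmem0 hbound0
    have halt : solution_alt stones k = if T > 0 then T else 0 := by
      simp only [solution_alt]
      rw [if_neg hkn, hT]
      rfl
    rw [halt]
    -- from a failing check, a small window, hence a mapped window max below m
    have hsmallwin : ∀ m : Int, check stones m k = false →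
        ∃ g, g ∈ (PySem.List.pyRange 0 ((stones.length : Int) - k + 1) 1).map
            (fun i => (PySem.List.max? (PySem.List.slice stones (some i) (some (i + k))) (fun y => y)).getD 0)
          ∧ g < m := by
      intro m hcf
      obtain ⟨pre, w, suf, hdec, hwlen, hsmall⟩ := (check_false_iff stones m k hk).mp hcf
      obtain ⟨hwin, hle⟩ := decomp_window stones pre w suf hdec
      have hlenstones : pre.length + w.length ≤ stones.length := hle
      obtain ⟨w', hw'eq, hdec', hwlen', hmem', hbound'⟩ :=
        window_max_spec stones k (pre.length : Int) hk (by positivity) (by omega)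
      have hww : w' = w := by
        rw [hw'eq, Int.toNat_natCast]
        rw [show k.toNat = w.length by omega]
        exact hwin
      refine ⟨_, hFin (pre.length : Int) (by positivity) (by omega), ?_⟩
      exact hsmall _ (hww ▸ hmem')
    refine solution_eq stones k _ (by split_ifs <;> omega) ?_ ?_ ?_ ?_
    · -- check m = true → m ≤ v
      intro m hm0 hmR hc
      by_contra hcon
      have hTm : T < m := by split_ifs at hcon <;> omega
      have hcf : check stones m k = false := by
        refine (check_false_iff stones m k hk).mpr ⟨_, w0, _, hdec0, hwlen0, ?_⟩
        intro x hx
        have := hbound0 x hx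
        omega
      rw [hc] at hcf
      exact absurd hcf (by simp)
    · -- 1 ≤ m ≤ v → check m = true
      intro m hm1 hmv
      have hTv : m ≤ T := by split_ifs at hmv <;> omega
      by_contra hcon
      have hcf : check stones m k = false := by
        cases h : check stones m k
        · rfl
        · exact absurd h hcon
      obtain ⟨g, hgL, hgm⟩ := hsmallwin m hcf
      have := hTmin g hgL
      omega
    · -- check 0 = false → v = 0
      intro hc0
      obtain ⟨g, hgL, hgm⟩ := hsmallwin 0 hc0
      have := hTmin g hgL
      rw [if_neg (by omega)]
    · -- v ≤ max(stones) or v = 0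
      rw [hRd]
      split_ifs with h
      · left
        have hTstones : T ∈ stones := by
          rw [hdec0]
          simp only [List.mem_append]
          exact Or.inl (Or.inr hmem0)
        exact hRmax T hTstones
      · exact Or.inr rfl
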